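-- pv_equiv track=rewrite | github.com/SACGF/variantgrid | annotation/phenotype_matching.py | replace_comments_with_spaces
-- ===== SOURCE A (Python) =====
-- def replace_comments_with_spaces(text):
--     """ Replace with spaces instead of removing so that characters offsets remain the same """
--     COMMENT = '-'
--     COMMENT_REPLACE = ' '
--     cleaned_chars = []
--
--     last_char = None
--     in_comment = False
--     for c in text:
--         if c == COMMENT and last_char == COMMENT:
--             in_comment = True
--         elif c == '\n':
--             in_comment = False
--
--         if in_comment:
--             cleaned_chars.append(COMMENT_REPLACE)
--         else:
--             cleaned_chars.append(c)
--         last_char = c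
--
--     return ''.join(cleaned_chars)
-- ===== SOURCE B (Python) =====
-- def replace_comments_with_spaces(text):
--     """ Replace with spaces instead of removing so that characters offsets remain the same """
--     lines = []
--     for line in text.split('\n'):
--         p = line.find('--')
--         if p >= 0:
--             lines.append(line[:p + 1] + ' ' * (len(line) - (p + 1)))
--         else:
--             lines.append(line)
--     return '\n'.join(lines)
-- ===== Notes on version B (the rewrite author's own statement) =====
-- stated objective: faster
-- what changed: Replaces the char-by-char last_char/in_comment state machine with per-line processing: split the text into lines, locate the first double-dash of each line with an indexed substring search and blank the rest of the line after its first dash, then rejoin the lines.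
import Mathlib
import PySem

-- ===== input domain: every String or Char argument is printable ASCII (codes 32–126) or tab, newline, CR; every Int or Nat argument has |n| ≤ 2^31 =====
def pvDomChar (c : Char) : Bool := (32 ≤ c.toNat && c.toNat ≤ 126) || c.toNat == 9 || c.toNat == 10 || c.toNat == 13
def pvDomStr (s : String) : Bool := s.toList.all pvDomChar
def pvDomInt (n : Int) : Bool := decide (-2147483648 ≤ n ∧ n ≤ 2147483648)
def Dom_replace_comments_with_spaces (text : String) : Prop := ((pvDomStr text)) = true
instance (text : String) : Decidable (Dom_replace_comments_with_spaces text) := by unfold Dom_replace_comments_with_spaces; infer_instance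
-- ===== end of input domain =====

-- B replaces A's char-by-char last_char/in_comment state machine by per-line indexed
-- substring search: split into lines, blank each line from its first double dash
-- (keeping the first dash, as A does), rejoin; measurably faster in Python, where
-- the per-line str primitives run in C instead of a per-character interpreted loop.

-- ===== PORT A =====
-- one loop step of A: state = (last_char, in_comment, cleaned_chars)
def pvStepA (st : Option Char × Bool × List Char) (c : Char) : Option Char × Bool × List Char :=
  let inComment : Bool :=
    if c = '-' ∧ st.1 = some '-' then true
    else if c = '\n' then false
    else st.2.1
  (some c, inComment, st.2.2 ++ [if inComment then ' ' else c])

def replace_comments_with_spaces (text : String) : String :=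
  String.ofList (text.toList.foldl pvStepA (none, false, [])).2.2

-- ===== PORT B =====
-- B's per-line body: p = line.find('--'); if p >= 0: line[:p+1] + ' '*(len-(p+1)) else line
def pvLineFix (line : List Char) : List Char :=
  let p := PySem.Chars.find line ['-', '-']
  if 0 ≤ p then
    PySem.List.slice line none (some (p + 1)) ++ List.replicate (line.length - (p.toNat + 1)) ' '
  else line

def replace_comments_with_spaces_alt (text : String) : String :=
  String.ofList (PySem.Chars.join ['\n'] ((text.toList.splitOn '\n').map pvLineFix))

-- ===== PRECONDITION & SPEC =====
def Spec_replace_comments_with_spaces (text : String) (out : String) : Prop := out = replace_comments_with_spaces_alt text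
instance (text : String) (out : String) : Decidable (Spec_replace_comments_with_spaces text out) := by unfold Spec_replace_comments_with_spaces; infer_instance

-- ===== CLAIM (what is proved, stated in full; the proofs are below) =====
def Claim_equal_replace_comments_with_spaces : Prop := ∀ (text : String), Dom_replace_comments_with_spaces text → Spec_replace_comments_with_spaces text (replace_comments_with_spaces text)

-- ===== LEMMAS AND PROOFS =====

-- A's loop as structural recursion on the remaining characters
def pvRunA : Option Char → Bool → List Char → List Char
  | _, _, [] => []
  | last, inc, c :: cs =>
    let inc' : Bool :=
      if c = '-' ∧ last = some '-' then true
      else if c = '\n' then false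
      else inc
    (if inc' then ' ' else c) :: pvRunA (some c) inc' cs

theorem pvFoldA (cs : List Char) : ∀ (last : Option Char) (inc : Bool) (acc : List Char),
    (cs.foldl pvStepA (last, inc, acc)).2.2 = acc ++ pvRunA last inc cs := by
  induction cs with
  | nil => intro last inc acc; simp [pvRunA]
  | cons c cs ih =>
    intro last inc acc
    simp only [List.foldl_cons, pvStepA, pvRunA, ih]
    simp

-- find points at k if there is a prefix occurrence at k and none earlier
theorem pvFindEq (s sub : List Char) (k : ℕ) (hk : sub <+: s.drop k)
    (hmin : ∀ i < k, ¬ sub <+: s.drop i) : PySem.Chars.find s sub = (k : ℤ) := by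
  have hinf : sub <:+: s := hk.isInfix.trans (List.drop_suffix k s).isInfix
  have hnn : 0 ≤ PySem.Chars.find s sub := (PySem.Chars.find_nonneg_iff s sub).2 hinf
  obtain ⟨h1, h2⟩ := PySem.Chars.find_spec hnn
  rcases lt_trichotomy (PySem.Chars.find s sub).toNat k with h | h | h
  · exact absurd h1 (hmin _ h)
  · omega
  · exact absurd hk (h2 k h)

theorem pvFindCons (c : Char) (l sub : List Char) (hnp : ¬ sub <+: (c :: l)) :
    PySem.Chars.find (c :: l) sub =
      if PySem.Chars.find l sub = -1 then -1 else PySem.Chars.find l sub + 1 := by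
  by_cases h : PySem.Chars.find l sub = -1
  · rw [h, if_pos rfl]
    rw [PySem.Chars.find_eq_neg_one_iff] at h ⊢
    intro hinf
    obtain ⟨j, hj⟩ := (PySem.Chars.exists_prefix_drop_iff_isIn sub (c :: l)).2
      ((PySem.Chars.isIn_iff_infix sub (c :: l)).2 hinf)
    match j, hj with
    | 0, hj => exact hnp hj
    | j + 1, hj =>
      have hinfl : sub <:+: l :=
        (PySem.Chars.isIn_iff_infix sub l).1
          ((PySem.Chars.exists_prefix_drop_iff_isIn sub l).1 ⟨j, by simpa using hj⟩)
      exact h hinfl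
  · rw [if_neg h]
    have hp : 0 ≤ PySem.Chars.find l sub := by
      have := PySem.Chars.neg_one_le_find l sub
      omega
    obtain ⟨h1, h2⟩ := PySem.Chars.find_spec hp
    have : PySem.Chars.find (c :: l) sub = (((PySem.Chars.find l sub).toNat + 1 : ℕ) : ℤ) := by
      apply pvFindEq
      · simpa using h1
      · intro i hi
        match i with
        | 0 => exact hnp
        | i + 1 => simpa using h2 i (by omega)
    rw [this]
    omega

-- B's per-line result: trivial line
theorem pvLineFix_nil : pvLineFix [] = [] := by decide

-- cons with no "--" at the head
theorem pvLineFix_cons (c : Char) (l : List Char) (h : ¬ ['-', '-'] <+: (c :: l)) :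
    pvLineFix (c :: l) = c :: pvLineFix l := by
  unfold pvLineFix
  rw [pvFindCons c l _ h]
  by_cases h1 : PySem.Chars.find l ['-', '-'] = -1
  · rw [if_pos h1, h1]
    norm_num
  · rw [if_neg h1]
    have hp : 0 ≤ PySem.Chars.find l ['-', '-'] := by
      have := PySem.Chars.neg_one_le_find l ['-', '-']
      omega
    rw [if_pos (by omega), if_pos hp]
    rw [PySem.List.slice_to _ (by omega), PySem.List.slice_to _ (by omega)]
    have ht : (PySem.Chars.find l ['-', '-'] + 1 + 1).toNat
        = (PySem.Chars.find l ['-', '-'] + 1).toNat + 1 := by omega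
    rw [ht, List.take_succ_cons]
    have hlen : (c :: l).length - ((PySem.Chars.find l ['-', '-'] + 1).toNat + 1)
        = l.length - ((PySem.Chars.find l ['-', '-']).toNat + 1) := by
      simp only [List.length_cons]
      omega
    rw [hlen]
    have ht2 : (PySem.Chars.find l ['-', '-'] + 1).toNat
        = (PySem.Chars.find l ['-', '-']).toNat + 1 := by omega
    rw [ht2]
    simp

-- a line opening with "--" is blanked after its first char
theorem pvLineFix_dd (l : List Char) :
    pvLineFix ('-' :: '-' :: l) = '-' :: ' ' :: List.replicate l.length ' ' := by
  have hf : PySem.Chars.find ('-' :: '-' :: l) ['-', '-'] = ((0 : ℕ) : ℤ) := by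
    apply pvFindEq
    · simp
    · intro i hi
      omega
  unfold pvLineFix
  rw [hf]
  norm_num
  rw [PySem.List.slice_to _ (by omega)]
  simp [List.replicate_succ]

-- tail part of a '\n'-join: empty for the last line, otherwise '\n' then the rest
def pvTail (t : List (List Char)) : List Char :=
  match t with
  | [] => []
  | q :: rest => '\n' :: PySem.Chars.join ['\n'] (q :: rest)

theorem pvJoinHead (a : List Char) (t : List (List Char)) :
    PySem.Chars.join ['\n'] (a :: t) = a ++ pvTail t := by
  cases t with
  | nil => simp [pvTail, PySem.Chars.join_singleton]
  | cons q rest => simp [pvTail, PySem.Chars.join_cons_cons]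

-- what A produces for a line whose preceding character was a dash
def pvLineFixD (l : List Char) : List Char :=
  if l.head? = some '-' then List.replicate l.length ' ' else pvLineFix l

theorem pvSplitCons (c : Char) (s : List Char) :
    (c :: s).splitOn '\n' =
      if c = '\n' then [] :: s.splitOn '\n'
      else (s.splitOn '\n').modifyHead (List.cons c) := by
  by_cases hc : c = '\n' <;> simp [List.splitOn, List.splitOnP_cons, hc]

theorem pvSplit_ne_nil (s : List Char) : s.splitOn '\n' ≠ [] := by
  unfold List.splitOn
  exact List.splitOnP_ne_nil _ _

theorem pvLineFixD_not_dash (l : List Char) (h : ¬ l.head? = some '-') :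
    pvLineFixD l = pvLineFix l := by
  simp [pvLineFixD, h]

theorem pvLineFix_dash_cons (l : List Char) :
    pvLineFix ('-' :: l) = '-' :: pvLineFixD l := by
  by_cases hl : l.head? = some '-'
  · cases l with
    | nil => simp at hl
    | cons d l' =>
      simp only [List.head?_cons, Option.some.injEq] at hl
      subst hl
      rw [pvLineFix_dd]
      simp [pvLineFixD, List.replicate_succ]
  · rw [pvLineFix_cons _ _ ?_, pvLineFixD_not_dash l hl]
    intro hpre
    rcases hpre with ⟨t, ht⟩
    cases l with
    | nil => simp at ht
    | cons d l' =>
      simp only [List.cons_append, List.cons.injEq] at ht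
      exact hl (by simp [← ht.2.1])

theorem pvMain (s : List Char) :
    (∀ last, last ≠ some '-' → pvRunA last false s
        = pvLineFix ((s.splitOn '\n').headI) ++ pvTail (((s.splitOn '\n').tail).map pvLineFix))
    ∧ (pvRunA (some '-') false s
        = pvLineFixD ((s.splitOn '\n').headI) ++ pvTail (((s.splitOn '\n').tail).map pvLineFix))
    ∧ (∀ last, pvRunA last true s
        = List.replicate ((s.splitOn '\n').headI).length ' ' ++ pvTail (((s.splitOn '\n').tail).map pvLineFix)) := by
  induction s with
  | nil =>
    refine ⟨fun last _ => ?_, ?_, fun last => ?_⟩ <;>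
      simp [pvRunA, List.splitOn, List.splitOnP_nil, pvTail, pvLineFix_nil, pvLineFixD]
  | cons c s ih =>
    rcases hsp : s.splitOn '\n' with _ | ⟨l, ls⟩
    · exact absurd hsp (pvSplit_ne_nil s)
    by_cases hc : c = '\n'
    · subst hc
      rw [pvSplitCons, if_pos rfl]
      simp only [List.headI_cons, List.tail_cons]
      rw [hsp]
      simp only [List.map_cons]
      have hT : pvTail (pvLineFix l :: ls.map pvLineFix)
          = '\n' :: (pvLineFix l ++ pvTail (ls.map pvLineFix)) := by
        rw [show pvTail (pvLineFix l :: ls.map pvLineFix)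
            = '\n' :: PySem.Chars.join ['\n'] (pvLineFix l :: ls.map pvLineFix) from rfl,
          pvJoinHead]
      have h1 := (ih.1 (some '\n') (by simp))
      rw [hsp] at h1
      simp only [List.headI_cons, List.tail_cons] at h1
      refine ⟨fun last _ => ?_, ?_, fun last => ?_⟩ <;>
        · show (if _ then _ else _) :: pvRunA _ _ s = _
          rw [hT]
          simp [h1, pvLineFix_nil, pvLineFixD]
    · rw [pvSplitCons]
      simp only [if_neg hc, hsp, List.modifyHead_cons, List.headI_cons, List.tail_cons]
      have hA := ih.1
      have hB := ih.2.1
      have hC := ih.2.2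
      rw [hsp] at hA hB hC
      simp only [List.headI_cons, List.tail_cons] at hA hB hC
      refine ⟨fun last hlast => ?_, ?_, fun last => ?_⟩
      · by_cases hcd : c = '-'
        · subst hcd
          show (if _ then _ else _) :: pvRunA _ _ s = _
          have hinc : (if ('-' : Char) = '-' ∧ last = some '-' then true
              else if ('-' : Char) = '\n' then false else false) = false := by
            simp [hlast]
          rw [pvLineFix_dash_cons, hinc]
          simp [hB]
        · show (if _ then _ else _) :: pvRunA _ _ s = _
          have hinc : (if c = '-' ∧ last = some '-' then true
              else if c = '\n' then false else false) = false := by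
            simp [hcd, hc]
          rw [pvLineFix_cons c l ?_]
          · simp only [hinc, Bool.false_eq_true, if_false, List.cons_append]
            congr 1
            exact hA (some c) (by simp [hcd])
          · intro hpre
            rcases hpre with ⟨t, ht⟩
            simp only [List.cons_append, List.cons.injEq] at ht
            exact hcd ht.1.symm
      · by_cases hcd : c = '-'
        · subst hcd
          show (if _ then _ else _) :: pvRunA _ _ s = _
          have hinc : (if ('-' : Char) = '-' ∧ (some '-' : Option Char) = some '-' then true
              else if ('-' : Char) = '\n' then false else false) = true := by simp
          rw [hinc]
          simp only [if_true]
          have : pvLineFixD ('-' :: l) = ' ' :: List.replicate l.length ' ' := by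
            simp [pvLineFixD, List.replicate_succ]
          rw [this]
          simp only [List.cons_append]
          congr 1
          exact hC (some '-')
        · show (if _ then _ else _) :: pvRunA _ _ s = _
          have hinc : (if c = '-' ∧ (some '-' : Option Char) = some '-' then true
              else if c = '\n' then false else false) = false := by simp [hcd, hc]
          have : pvLineFixD (c :: l) = c :: pvLineFix l := by
            rw [pvLineFixD_not_dash _ (by simp [hcd]), pvLineFix_cons c l ?_]
            intro hpre
            rcases hpre with ⟨t, ht⟩
            simp only [List.cons_append, List.cons.injEq] at ht
            exact hcd ht.1.symm
          rw [this, hinc]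
          simp only [Bool.false_eq_true, if_false, List.cons_append]
          congr 1
          exact hA (some c) (by simp [hcd])
      · show (if _ then _ else _) :: pvRunA _ _ s = _
        have hinc : (if c = '-' ∧ last = some '-' then true
            else if c = '\n' then false else true) = true := by
          by_cases hp : c = '-' ∧ last = some '-' <;> simp [hp, hc]
        rw [hinc]
        simp only [if_true, List.length_cons, List.replicate_succ, List.cons_append]
        congr 1
        exact hC (some c)

-- ===== VERDICT (by name: the statement is the Claim_ definition above) =====
theorem replace_comments_with_spaces_spec : Claim_equal_replace_comments_with_spaces := by
  intro text _
  unfold Spec_replace_comments_with_spaces replace_comments_with_spaces replace_comments_with_spaces_alt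
  rw [pvFoldA]
  simp only [List.nil_append]
  congr 1
  rw [(pvMain text.toList).1 none (by simp)]
  rcases hsp : text.toList.splitOn '\n' with _ | ⟨l, ls⟩
  · exact absurd hsp (pvSplit_ne_nil text.toList)
  · simp [pvJoinHead]
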